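-- pv_equiv track=rewrite | github.com/christianslothouber/advent-of-code-2024 | d08/solution.py | collect_pairs
-- ===== SOURCE A (Python) =====
-- def collect_pairs(grid, frequency):
--     pairs = []
--
--     for x1 in range(len(grid)):
--         for y1 in range(len(grid[0])):
--             if grid[x1][y1] == frequency:
--                 for x2 in range(len(grid)):
--                     for y2 in range(len(grid[0])):
--                         if x1 == x2 and y1 == y2:
--                             continue
--
--                         if grid[x2][y2] == frequency:
--                             pair = ((x1, y1), (x2, y2))
--
--                             pairs.append(pair)
--
--     return pairs
-- ===== SOURCE B (Python) =====
-- def collect_pairs(grid, frequency):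
--     # Collect matching positions in one pass, then emit all ordered pairs of
--     # distinct positions from that list.
--     if not grid:
--         return []
--     w = len(grid[0])
--     pos = [(x, y) for x in range(len(grid)) for y in range(w)
--            if grid[x][y] == frequency]
--     return [(p, q) for p in pos for q in pos if q != p]
-- ===== Notes on version B (the rewrite author's own statement) =====
-- stated objective: alternative
-- what changed: Instead of re-scanning the whole grid for the inner partner (four nested loops), B scans the grid once to collect the matching positions into a list and then emits all ordered pairs of distinct positions from that list; O(H*W + k^2) scans vs O((H*W)^2), though on match-dense inputs the k^2 pairing dominates both.
import Mathlib
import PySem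

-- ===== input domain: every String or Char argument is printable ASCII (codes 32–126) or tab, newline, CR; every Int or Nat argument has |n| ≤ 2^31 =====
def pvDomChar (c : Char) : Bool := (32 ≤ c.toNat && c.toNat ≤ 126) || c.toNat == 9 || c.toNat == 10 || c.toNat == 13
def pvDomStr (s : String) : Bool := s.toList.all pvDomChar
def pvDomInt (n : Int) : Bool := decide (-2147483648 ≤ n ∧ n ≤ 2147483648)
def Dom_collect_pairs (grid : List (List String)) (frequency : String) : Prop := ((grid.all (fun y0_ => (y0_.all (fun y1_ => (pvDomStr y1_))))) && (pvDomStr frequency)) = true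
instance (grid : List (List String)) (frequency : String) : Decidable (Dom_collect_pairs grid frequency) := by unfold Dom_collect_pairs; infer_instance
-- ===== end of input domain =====

-- B collects the matching positions in one grid pass and then pairs them,
-- instead of A's rescan of the whole grid for every matching cell (alternative algorithm).


-- ===== PORT A =====
-- grid[x] (IndexError impossible for x in range(len(grid)); default never read inside Pre_)
def pvRow (grid : List (List String)) (x : Int) : List String :=
  (PySem.List.pyGet? grid x).getD []

-- grid[x][y]; the "" default is never read inside Pre_
def pvCell (grid : List (List String)) (x y : Int) : String :=
  (PySem.List.pyGet? (pvRow grid x) y).getD ""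

def collect_pairs (grid : List (List String)) (frequency : String) :
    List ((Int × Int) × (Int × Int)) :=
  (PySem.List.pyRange 0 (grid.length : Int) 1).foldl (fun pairs x1 =>
    (PySem.List.pyRange 0 ((pvRow grid 0).length : Int) 1).foldl (fun pairs y1 =>
      if pvCell grid x1 y1 = frequency then
        (PySem.List.pyRange 0 (grid.length : Int) 1).foldl (fun pairs x2 =>
          (PySem.List.pyRange 0 ((pvRow grid 0).length : Int) 1).foldl (fun pairs y2 =>
            if x1 = x2 ∧ y1 = y2 then pairs
            else if pvCell grid x2 y2 = frequency then
              pairs ++ [((x1, y1), (x2, y2))]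
            else pairs) pairs) pairs
      else pairs) pairs) []

-- ===== PORT B =====
def collect_pairs_alt (grid : List (List String)) (frequency : String) :
    List ((Int × Int) × (Int × Int)) :=
  if grid = [] then []
  else
    let w : Int := ((pvRow grid 0).length : Int)
    let pos : List (Int × Int) :=
      (PySem.List.pyRange 0 (grid.length : Int) 1).flatMap (fun x =>
        (PySem.List.pyRange 0 w 1).filterMap (fun y =>
          if pvCell grid x y = frequency then some (x, y) else none))
    pos.flatMap (fun p => (pos.filter (fun q => q ≠ p)).map (fun q => (p, q)))

-- ===== PRECONDITION & SPEC =====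
-- Pre_ excludes exactly the inputs where Python A raises IndexError: a row
-- strictly shorter than row 0 (A indexes every row at all columns of row 0).
-- B raises on exactly the same inputs.
def Pre_collect_pairs (grid : List (List String)) (frequency : String) : Prop :=
  ∀ row ∈ grid, (grid.headD []).length ≤ row.length
instance (grid : List (List String)) (frequency : String) : Decidable (Pre_collect_pairs grid frequency) := by unfold Pre_collect_pairs; infer_instance

def pvWitness_collect_pairs : List (List String) × String :=
  ([["a", "."], [".", "a"]], "a")

def Spec_collect_pairs (grid : List (List String)) (frequency : String) (out : List ((Int × Int) × (Int × Int))) : Prop := out = collect_pairs_alt grid frequency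
instance (grid : List (List String)) (frequency : String) (out : List ((Int × Int) × (Int × Int))) : Decidable (Spec_collect_pairs grid frequency out) := by unfold Spec_collect_pairs; infer_instance

-- ===== CLAIM (what is proved, stated in full; the proofs are below) =====
def Claim_equal_collect_pairs : Prop := ∀ (grid : List (List String)) (frequency : String), Dom_collect_pairs grid frequency → Pre_collect_pairs grid frequency → Spec_collect_pairs grid frequency (collect_pairs grid frequency)

-- ===== LEMMAS AND PROOFS =====

-- proof-only abbreviations for the two index ranges, the match test and B's position list
def pvX (grid : List (List String)) : List Int :=
  PySem.List.pyRange 0 (grid.length : Int) 1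

def pvY (grid : List (List String)) : List Int :=
  PySem.List.pyRange 0 ((pvRow grid 0).length : Int) 1

def pvM (grid : List (List String)) (frequency : String) (x y : Int) : Bool :=
  decide (pvCell grid x y = frequency)

def pvPos (grid : List (List String)) (frequency : String) : List (Int × Int) :=
  (pvX grid).flatMap (fun x =>
    ((pvY grid).filter (fun y => pvM grid frequency x y)).map (fun y => (x, y)))

-- A's inner double loop, in flatMap form
def pvF (grid : List (List String)) (frequency : String) (x1 y1 : Int) :
    List ((Int × Int) × (Int × Int)) :=
  (pvX grid).flatMap (fun x2 =>
    ((pvY grid).filter (fun y2 =>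
        decide (¬ (x1 = x2 ∧ y1 = y2)) && pvM grid frequency x2 y2)).map
      (fun y2 => ((x1, y1), (x2, y2))))

-- comprehension with a guard: filterMap of if-some/none is filter-then-map
theorem pv_filterMap_if {α β : Type} (l : List α) (p : α → Prop) [DecidablePred p]
    (f : α → β) :
    l.filterMap (fun y => if p y then some (f y) else none)
      = (l.filter (fun y => decide (p y))).map f := by
  induction l with
  | nil => rfl
  | cons a t ih => by_cases h : p a <;> simp [h, ih]

-- iterating over a filtered list is iterating with a guard
theorem pv_flatMap_filter {α β : Type} (l : List α) (p : α → Bool) (g : α → List β) :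
    (l.filter p).flatMap g = l.flatMap (fun x => if p x then g x else []) := by
  induction l with
  | nil => rfl
  | cons a t ih => by_cases h : p a <;> simp [h, ih]

-- A's quadruple loop in flatMap normal form
theorem pvA_eq (grid : List (List String)) (frequency : String) :
    collect_pairs grid frequency
      = (pvX grid).flatMap (fun x1 => (pvY grid).flatMap (fun y1 =>
          if pvM grid frequency x1 y1 then pvF grid frequency x1 y1 else [])) := by
  have hinner : ∀ (x1 y1 x2 : Int) (acc : List ((Int × Int) × (Int × Int))),
      (pvY grid).foldl (fun pairs y2 =>
          if x1 = x2 ∧ y1 = y2 then pairs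
          else if pvCell grid x2 y2 = frequency then pairs ++ [((x1, y1), (x2, y2))]
          else pairs) acc
        = acc ++ ((pvY grid).filter (fun y2 =>
              decide (¬ (x1 = x2 ∧ y1 = y2)) && pvM grid frequency x2 y2)).map
            (fun y2 => ((x1, y1), (x2, y2))) := by
    intro x1 y1 x2 acc
    have hf : (fun (pairs : List ((Int × Int) × (Int × Int))) y2 =>
          if x1 = x2 ∧ y1 = y2 then pairs
          else if pvCell grid x2 y2 = frequency then pairs ++ [((x1, y1), (x2, y2))]
          else pairs)
        = (fun pairs y2 =>
          if (decide (¬ (x1 = x2 ∧ y1 = y2)) && pvM grid frequency x2 y2) then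
            pairs ++ [((x1, y1), (x2, y2))] else pairs) := by
      funext pairs y2
      by_cases h1 : x1 = x2 ∧ y1 = y2
      · simp [h1]
      · by_cases h2 : pvCell grid x2 y2 = frequency <;> simp [pvM, h1, h2]
    rw [hf, PySem.List.foldl_append_if]
  have hmid : ∀ (x1 y1 : Int) (acc : List ((Int × Int) × (Int × Int))),
      (pvX grid).foldl (fun pairs x2 =>
          (pvY grid).foldl (fun pairs y2 =>
            if x1 = x2 ∧ y1 = y2 then pairs
            else if pvCell grid x2 y2 = frequency then pairs ++ [((x1, y1), (x2, y2))]
            else pairs) pairs) acc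
        = acc ++ pvF grid frequency x1 y1 := by
    intro x1 y1 acc
    have hf : (fun (pairs : List ((Int × Int) × (Int × Int))) x2 =>
          (pvY grid).foldl (fun pairs y2 =>
            if x1 = x2 ∧ y1 = y2 then pairs
            else if pvCell grid x2 y2 = frequency then pairs ++ [((x1, y1), (x2, y2))]
            else pairs) pairs)
        = (fun pairs x2 => pairs ++ ((pvY grid).filter (fun y2 =>
              decide (¬ (x1 = x2 ∧ y1 = y2)) && pvM grid frequency x2 y2)).map
            (fun y2 => ((x1, y1), (x2, y2)))) := by
      funext pairs x2; exact hinner x1 y1 x2 pairs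
    rw [hf, PySem.List.foldl_append_eq_flatMap]; rfl
  have hy : ∀ (x1 : Int) (acc : List ((Int × Int) × (Int × Int))),
      (pvY grid).foldl (fun pairs y1 =>
          if pvCell grid x1 y1 = frequency then
            (pvX grid).foldl (fun pairs x2 =>
              (pvY grid).foldl (fun pairs y2 =>
                if x1 = x2 ∧ y1 = y2 then pairs
                else if pvCell grid x2 y2 = frequency then pairs ++ [((x1, y1), (x2, y2))]
                else pairs) pairs) pairs
          else pairs) acc
        = acc ++ (pvY grid).flatMap (fun y1 =>
            if pvM grid frequency x1 y1 then pvF grid frequency x1 y1 else []) := by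
    intro x1 acc
    have hf : (fun (pairs : List ((Int × Int) × (Int × Int))) y1 =>
          if pvCell grid x1 y1 = frequency then
            (pvX grid).foldl (fun pairs x2 =>
              (pvY grid).foldl (fun pairs y2 =>
                if x1 = x2 ∧ y1 = y2 then pairs
                else if pvCell grid x2 y2 = frequency then pairs ++ [((x1, y1), (x2, y2))]
                else pairs) pairs) pairs
          else pairs)
        = (fun pairs y1 => pairs ++
            (if pvM grid frequency x1 y1 then pvF grid frequency x1 y1 else [])) := by
      funext pairs y1
      by_cases h : pvCell grid x1 y1 = frequency
      · simp only [pvM, h, decide_true, if_true, hmid x1 y1 pairs]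
      · simp [pvM, h]
    rw [hf, PySem.List.foldl_append_eq_flatMap]
  have hx : (fun (pairs : List ((Int × Int) × (Int × Int))) x1 =>
        (pvY grid).foldl (fun pairs y1 =>
          if pvCell grid x1 y1 = frequency then
            (pvX grid).foldl (fun pairs x2 =>
              (pvY grid).foldl (fun pairs y2 =>
                if x1 = x2 ∧ y1 = y2 then pairs
                else if pvCell grid x2 y2 = frequency then pairs ++ [((x1, y1), (x2, y2))]
                else pairs) pairs) pairs
          else pairs) pairs)
      = (fun pairs x1 => pairs ++ (pvY grid).flatMap (fun y1 =>
          if pvM grid frequency x1 y1 then pvF grid frequency x1 y1 else [])) := by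
    funext pairs x1; exact hy x1 pairs
  unfold collect_pairs
  rw [show PySem.List.pyRange 0 ((pvRow grid 0).length : Int) 1 = pvY grid from rfl,
      show PySem.List.pyRange 0 (grid.length : Int) 1 = pvX grid from rfl,
      hx, PySem.List.foldl_append_eq_flatMap, List.nil_append]

-- B's result, written with pvPos
theorem pvB_eq (grid : List (List String)) (frequency : String) :
    collect_pairs_alt grid frequency
      = (pvPos grid frequency).flatMap (fun p =>
          ((pvPos grid frequency).filter (fun q => q ≠ p)).map (fun q => (p, q))) := by
  by_cases hg : grid = []
  · subst hg
    have hx : pvX ([] : List (List String)) = [] := by decide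
    simp [collect_pairs_alt, pvPos, hx]
  · simp only [collect_pairs_alt, if_neg hg]
    have : ∀ x : Int, (pvY grid).filterMap
          (fun y => if pvCell grid x y = frequency then some (x, y) else none)
        = ((pvY grid).filter (fun y => pvM grid frequency x y)).map (fun y => (x, y)) := by
      intro x
      exact pv_filterMap_if (pvY grid) (fun y => pvCell grid x y = frequency) _
    simp only [pvPos, pvX, pvY, pvM] at *
    rw [funext this]

-- for a fixed source position, B's partner list equals A's inner double loop
theorem pv_partner (grid : List (List String)) (frequency : String) (x1 y1 : Int) :
    ((pvPos grid frequency).filter (fun q => q ≠ (x1, y1))).map (fun q => ((x1, y1), q))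
      = pvF grid frequency x1 y1 := by
  unfold pvPos pvF
  rw [List.filter_flatMap, List.map_flatMap]
  congr 1; funext x2
  rw [List.filter_map, List.map_map, List.filter_filter]
  congr 1
  apply List.filter_congr
  intro y2 _
  simp only [Function.comp, ne_eq, Prod.mk.injEq]
  congr 1
  exact decide_eq_decide.mpr (by omega)

-- ===== VERDICT (by name: the statement is the Claim_ definition above) =====
theorem collect_pairs_spec : Claim_equal_collect_pairs := by
  intro grid frequency _ _
  show collect_pairs grid frequency = collect_pairs_alt grid frequency
  rw [pvA_eq, pvB_eq, pvPos]
  rw [List.flatMap_assoc]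
  congr 1; funext x1
  rw [List.flatMap_map]
  rw [pv_flatMap_filter]
  congr 1; funext y1
  by_cases h : pvM grid frequency x1 y1
  · simp only [h, if_true]
    have := pv_partner grid frequency x1 y1
    rw [← this, pvPos]
  · rw [if_neg h, if_neg h]
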